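-- pv_equiv track=rewrite | github.com/linfengde/doc-analysis | utils.py | get_word_position
-- ===== SOURCE A (Python) =====
-- def get_word_position(list_position_name,keywords_list):
--     list_price_positoin_address = []
--     for i in list_position_name:
--         address_index = [x for x in range(len(list_position_name)) if list_position_name[x] == i]
--         list_price_positoin_address.append([i, address_index])
--     dict_address = dict(list_price_positoin_address)
--     dict_address_keywords = { k:v for k,v in dict_address.items() if k in keywords_list}
--     return dict_address_keywords
-- ===== SOURCE B (Python) =====
-- def get_word_position(list_position_name, keywords_list):
--     positions = {}
--     for idx, word in enumerate(list_position_name):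
--         positions.setdefault(word, []).append(idx)
--     kw = set(keywords_list)
--     return {w: ix for w, ix in positions.items() if w in kw}
-- ===== Notes on version B (the rewrite author's own statement) =====
-- stated objective: faster
-- what changed: replaces the per-element rescan of the whole list (and rebuilding the full index list once per occurrence) by a single enumerate pass grouping indices into a dict, then filters by a keyword set
import Mathlib
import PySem

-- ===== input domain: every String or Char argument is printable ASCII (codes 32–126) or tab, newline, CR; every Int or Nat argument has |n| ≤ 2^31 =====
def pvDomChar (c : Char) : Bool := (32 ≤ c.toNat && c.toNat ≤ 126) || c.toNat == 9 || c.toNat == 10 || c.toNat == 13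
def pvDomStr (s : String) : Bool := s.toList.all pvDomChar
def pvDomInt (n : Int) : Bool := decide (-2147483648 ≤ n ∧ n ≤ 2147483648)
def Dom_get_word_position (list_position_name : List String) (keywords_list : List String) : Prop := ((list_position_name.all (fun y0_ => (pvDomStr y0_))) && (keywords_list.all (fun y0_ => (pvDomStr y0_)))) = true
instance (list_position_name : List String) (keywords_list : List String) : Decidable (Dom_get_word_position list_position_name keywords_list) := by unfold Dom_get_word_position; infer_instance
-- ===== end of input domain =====

-- B replaces A's per-element rescan of the whole list by one grouping pass over enumerate,
-- then filters by a keyword set (objective: faster, O(n^2) → O(n)).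

-- ===== PORT A =====
def get_word_position (list_position_name : List String) (keywords_list : List String) : List (String × List Int) :=
  let list_price_positoin_address : List (String × List Int) :=
    list_position_name.foldl (fun acc i =>
      acc ++ [(i, (PySem.List.pyRange 0 (PySem.List.len list_position_name)).filter
        (fun x => PySem.List.pyGetD list_position_name x "" == i))]) []
  let dict_address : PySem.Dict String (List Int) := PySem.Dict.ofList list_price_positoin_address
  let dict_address_keywords : PySem.Dict String (List Int) :=
    dict_address.items.foldl (fun d p =>
      if keywords_list.contains p.1 then d.insert p.1 p.2 else d) PySem.Dict.empty
  dict_address_keywords.items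

-- ===== PORT B =====
-- 'positions.setdefault(word, []).append(idx)' is ported as Dict.modify word [] (· ++ [idx]) — exact (d[k] = d.get(k, []) + [idx]).
def get_word_position_alt (list_position_name : List String) (keywords_list : List String) : List (String × List Int) :=
  let positions : PySem.Dict String (List Int) :=
    (PySem.List.enumerate list_position_name).foldl
      (fun d p => d.modify p.2 [] (fun l => l ++ [p.1])) PySem.Dict.empty
  let kw : PySem.Set String := PySem.Set.ofList keywords_list
  (positions.items.foldl (fun d p =>
      if PySem.Set.contains kw p.1 then d.insert p.1 p.2 else d) PySem.Dict.empty).items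

-- ===== PRECONDITION & SPEC =====
def Spec_get_word_position (list_position_name : List String) (keywords_list : List String) (out : List (String × List Int)) : Prop := out = get_word_position_alt list_position_name keywords_list
instance (list_position_name : List String) (keywords_list : List String) (out : List (String × List Int)) : Decidable (Spec_get_word_position list_position_name keywords_list out) := by unfold Spec_get_word_position; infer_instance

-- ===== CLAIM (what is proved, stated in full; the proofs are below) =====
def Claim_equal_get_word_position : Prop := ∀ (list_position_name : List String) (keywords_list : List String), Dom_get_word_position list_position_name keywords_list → Spec_get_word_position list_position_name keywords_list (get_word_position list_position_name keywords_list)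

-- ===== LEMMAS AND PROOFS =====

-- a fold inserting a key-determined value: lookup is the value iff the key occurred
theorem getD_foldl_insert_keyfun (l : List String) (v : String → List Int)
    (d : PySem.Dict String (List Int)) (k : String) (dflt : List Int) :
    (l.foldl (fun d x => d.insert x (v x)) d).getD k dflt
      = if k ∈ l then v k else d.getD k dflt := by
  induction l generalizing d with
  | nil => simp
  | cons a t ih =>
    simp only [List.foldl_cons, ih, PySem.Dict.getD_insert, List.mem_cons]
    by_cases hk : k = a <;> by_cases ht : k ∈ t <;> simp [hk, ht]

theorem items_A (lpn : List String) :
    (PySem.Dict.ofList (lpn.map (fun i => (i,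
        (PySem.List.pyRange 0 (PySem.List.len lpn)).filter
          (fun x => PySem.List.pyGetD lpn x "" == i))))).items
      = (PySem.Set.ofList lpn).map (fun w => (w,
          (PySem.List.pyRange 0 (PySem.List.len lpn)).filter
            (fun x => PySem.List.pyGetD lpn x "" == w))) := by
  set f := fun w => (PySem.List.pyRange 0 (PySem.List.len lpn)).filter
      (fun x => PySem.List.pyGetD lpn x "" == w) with hf
  have hofl : PySem.Dict.ofList (lpn.map (fun i => (i, f i)))
      = lpn.foldl (fun d x => d.insert x (f x)) PySem.Dict.empty := by
    simp [PySem.Dict.ofList, PySem.Dict.update, List.foldl_map]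
  rw [hofl]
  have hnd : (lpn.foldl (fun d x => d.insert x (f x)) PySem.Dict.empty).keys.Nodup :=
    PySem.Dict.nodup_keys_foldl_insert lpn (fun _ x => f x) _ (by simp)
  rw [PySem.Dict.items_eq_map_keys _ hnd []]
  rw [PySem.Dict.keys_foldl_insert lpn (fun _ x => f x), PySem.Dict.keys_empty,
      PySem.Set.update_nil_left]
  apply List.map_congr_left
  intro w hw
  rw [getD_foldl_insert_keyfun lpn f PySem.Dict.empty w []]
  have hwm : w ∈ lpn := by simpa [PySem.Set.mem_ofList] using hw
  simp [hwm, hf, PySem.List.len]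

theorem items_B (lpn : List String) :
    ((PySem.List.enumerate lpn).foldl
        (fun d p => d.modify p.2 [] (fun l => l ++ [p.1])) PySem.Dict.empty).items
      = (PySem.Set.ofList lpn).map (fun w => (w,
          (PySem.List.pyRange 0 (PySem.List.len lpn)).filter
            (fun x => PySem.List.pyGetD lpn x "" == w))) := by
  have hswap : (PySem.List.enumerate lpn).foldl
        (fun d p => d.modify p.2 [] (fun l => l ++ [p.1])) PySem.Dict.empty
      = ((PySem.List.enumerate lpn).map Prod.swap).foldl
        (fun d p => d.modify p.1 [] (fun l => l ++ [p.2])) PySem.Dict.empty := by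
    rw [List.foldl_map]
    rfl
  rw [hswap]
  have hnd : (((PySem.List.enumerate lpn).map Prod.swap).foldl
        (fun d p => d.modify p.1 [] (fun l => l ++ [p.2])) PySem.Dict.empty).keys.Nodup := by
    have := PySem.Dict.nodup_keys_foldl_modify_key
      ((PySem.List.enumerate lpn).map Prod.swap) Prod.fst []
      (fun _ p l => l ++ [p.2]) PySem.Dict.empty (by simp)
    exact this
  rw [PySem.Dict.items_eq_map_keys _ hnd []]
  have hkeys : (((PySem.List.enumerate lpn).map Prod.swap).foldl
        (fun d p => d.modify p.1 [] (fun l => l ++ [p.2])) PySem.Dict.empty).keys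
      = PySem.Set.ofList lpn := by
    rw [PySem.Dict.keys_foldl_modify_key ((PySem.List.enumerate lpn).map Prod.swap)
        Prod.fst [] (fun _ p l => l ++ [p.2]) PySem.Dict.empty]
    simp [PySem.Dict.keys_empty, PySem.Set.update_nil_left, List.map_map]
    rw [show ((fun p => p.1) ∘ (Prod.swap : Int × String → String × Int)) = (fun p => p.2) from rfl,
        PySem.List.map_snd_enumerate]
  rw [hkeys]
  apply List.map_congr_left
  intro w _
  rw [PySem.Dict.getD_foldl_modify_append ((PySem.List.enumerate lpn).map Prod.swap)
      PySem.Dict.empty w]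
  rw [PySem.List.enumerate_eq_map_pyRange lpn ""]
  simp only [List.map_map, List.filter_map, List.map_map]
  simp [Function.comp_def]

theorem get_word_position_spec : Claim_equal_get_word_position := by
  intro lpn kws _
  unfold Spec_get_word_position get_word_position get_word_position_alt
  simp only []
  rw [PySem.List.foldl_append_singleton_eq_map
      (fun i => (i, (PySem.List.pyRange 0 (PySem.List.len lpn)).filter
        (fun x => PySem.List.pyGetD lpn x "" == i))) lpn []]
  rw [List.nil_append, items_A lpn, items_B lpn]
  apply congrArg PySem.Dict.items
  have hfun : (fun (d : PySem.Dict String (List Int)) (p : String × List Int) =>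
        if kws.contains p.1 then d.insert p.1 p.2 else d)
      = (fun (d : PySem.Dict String (List Int)) (p : String × List Int) =>
        if PySem.Set.contains (PySem.Set.ofList kws) p.1 then d.insert p.1 p.2 else d) := by
    funext d p
    have hc : kws.contains p.1 = PySem.Set.contains (PySem.Set.ofList kws) p.1 := by
      by_cases h : p.1 ∈ kws <;>
        simp [PySem.Set.contains_eq_listContains, h, PySem.Set.mem_ofList]
    rw [hc]
  rw [hfun]
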